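-- pv_equiv track=rewrite | github.com/elgerytme/Pynomaly | scripts/update_changelog_helper.py | format_changelog_entry
-- ===== SOURCE A (Python) =====
-- from typing import List, Dict, Optional
--
-- def format_changelog_entry(version: str, date: str, entries: Dict[str, List[str]]) -> str:
--     """Format changelog entry according to project standards."""
--
--     # Map category keys to display names
--     category_names = {
--         'added': 'Added',
--         'changed': 'Changed',
--         'deprecated': 'Deprecated',
--         'removed': 'Removed',
--         'fixed': 'Fixed',
--         'security': 'Security',
--         'performance': 'Performance',
--         'documentation': 'Documentation',
--         'infrastructure': 'Infrastructure',
--         'testing': 'Testing'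
--     }
--
--     lines = [f"## [{version}] - {date}", ""]
--
--     # Order categories by importance
--     category_order = ['added', 'changed', 'deprecated', 'removed', 'fixed', 'security',
--                      'performance', 'documentation', 'infrastructure', 'testing']
--
--     for category in category_order:
--         if category in entries and entries[category]:
--             lines.append(f"### {category_names[category]}")
--             for entry in entries[category]:
--                 lines.append(f"- {entry}")
--             lines.append("")
--
--     return "\n".join(lines)
-- ===== SOURCE B (Python) =====
-- def format_changelog_entry(version, date, entries):
--     """Format changelog entry: single pass over the entries dict, rank-sort the kept sections, emit by string accumulation."""
--     labels = {
--         'added': (0, 'Added'), 'changed': (1, 'Changed'), 'deprecated': (2, 'Deprecated'),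
--         'removed': (3, 'Removed'), 'fixed': (4, 'Fixed'), 'security': (5, 'Security'),
--         'performance': (6, 'Performance'), 'documentation': (7, 'Documentation'),
--         'infrastructure': (8, 'Infrastructure'), 'testing': (9, 'Testing'),
--     }
--     sections = sorted(
--         ((labels[key][0], labels[key][1], items)
--          for key, items in entries.items() if key in labels and items),
--         key=lambda t: t[0])
--     out = f"## [{version}] - {date}\n"
--     for _rank, label, items in sections:
--         out += f"\n### {label}\n"
--         for e in items:
--             out += f"- {e}\n"
--     return out
-- ===== Notes on version B (the rewrite author's own statement) =====
-- stated objective: alternative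
-- what changed: B makes a single pass over the entries dict instead of scanning the fixed category list: each present nonempty known category is turned into a (rank,label,items) triple via one rank/label map, the triples are sorted by rank, and the result is emitted by direct string accumulation with trailing newlines instead of building a flat line list joined once.
import Mathlib
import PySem

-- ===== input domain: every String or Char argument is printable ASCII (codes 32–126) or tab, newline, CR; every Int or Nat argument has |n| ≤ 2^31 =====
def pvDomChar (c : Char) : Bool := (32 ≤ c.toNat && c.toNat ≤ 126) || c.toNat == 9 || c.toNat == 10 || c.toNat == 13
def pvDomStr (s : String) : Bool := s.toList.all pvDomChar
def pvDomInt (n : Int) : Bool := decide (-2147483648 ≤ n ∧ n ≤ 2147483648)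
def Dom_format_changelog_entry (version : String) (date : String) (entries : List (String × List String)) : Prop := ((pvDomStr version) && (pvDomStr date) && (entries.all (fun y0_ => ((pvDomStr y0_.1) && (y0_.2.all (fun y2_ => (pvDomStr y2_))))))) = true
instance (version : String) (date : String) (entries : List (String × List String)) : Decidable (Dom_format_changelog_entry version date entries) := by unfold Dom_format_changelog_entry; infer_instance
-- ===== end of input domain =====

-- B replaces A's scan of the fixed category list with one pass over the entries dict that
-- collects (rank, label, items) triples, sorts them by rank, and emits by string accumulation;
-- objective: alternative decomposition, same cost.

-- ===== PORT A =====
def pvCategoryNames : PySem.Dict String String := PySem.Dict.mk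
  [("added", "Added"), ("changed", "Changed"), ("deprecated", "Deprecated"),
   ("removed", "Removed"), ("fixed", "Fixed"), ("security", "Security"),
   ("performance", "Performance"), ("documentation", "Documentation"),
   ("infrastructure", "Infrastructure"), ("testing", "Testing")]

def pvCategoryOrder : List String :=
  ["added", "changed", "deprecated", "removed", "fixed", "security",
   "performance", "documentation", "infrastructure", "testing"]

-- body of A's 'for category in category_order' loop
def pvStepA (d : PySem.Dict String (List String)) (lines : List String) (category : String) : List String :=
  match d.get? category with
  | none => lines
  | some es =>
    if es.isEmpty then lines
    else
      let lines := lines ++ ["### " ++ pvCategoryNames.getD category ""]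
      let lines := es.foldl (fun lines e => lines ++ ["- " ++ e]) lines
      lines ++ [""]

def format_changelog_entry (version : String) (date : String) (entries : List (String × List String)) : String :=
  PySem.Str.join "\n"
    (pvCategoryOrder.foldl (pvStepA (PySem.Dict.ofList entries))
      ["## [" ++ version ++ "] - " ++ date, ""])

-- ===== PORT B =====
def pvLabels : PySem.Dict String (Int × String) := PySem.Dict.mk
  [("added", (0, "Added")), ("changed", (1, "Changed")), ("deprecated", (2, "Deprecated")),
   ("removed", (3, "Removed")), ("fixed", (4, "Fixed")), ("security", (5, "Security")),
   ("performance", (6, "Performance")), ("documentation", (7, "Documentation")),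
   ("infrastructure", (8, "Infrastructure")), ("testing", (9, "Testing"))]

-- one element of B's generator: key in labels and items nonempty ↦ (rank, label, items)
def pvTriple (ki : String × List String) : Option (Int × String × List String) :=
  match pvLabels.get? ki.1 with
  | none => none
  | some rl => if ki.2.isEmpty then none else some (rl.1, rl.2, ki.2)

def format_changelog_entry_alt (version : String) (date : String) (entries : List (String × List String)) : String :=
  let sections := PySem.List.sorted
    ((PySem.Dict.ofList entries).items.filterMap pvTriple) (fun t => t.1)
  sections.foldl
    (fun out t =>
      t.2.2.foldl (fun out e => out ++ ("- " ++ e ++ "\n"))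
        (out ++ ("\n### " ++ t.2.1 ++ "\n")))
    ("## [" ++ version ++ "] - " ++ date ++ "\n")

-- ===== PRECONDITION & SPEC =====
def Spec_format_changelog_entry (version : String) (date : String) (entries : List (String × List String)) (out : String) : Prop := out = format_changelog_entry_alt version date entries
instance (version : String) (date : String) (entries : List (String × List String)) (out : String) : Decidable (Spec_format_changelog_entry version date entries out) := by unfold Spec_format_changelog_entry; infer_instance

-- ===== CLAIM (what is proved, stated in full; the proofs are below) =====
def Claim_equal_format_changelog_entry : Prop := ∀ (version : String) (date : String) (entries : List (String × List String)), Dom_format_changelog_entry version date entries → Spec_format_changelog_entry version date entries (format_changelog_entry version date entries)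

-- ===== LEMMAS AND PROOFS =====

-- the ten categories with their ranks and display labels, in rank order
def pvLabelList : List (String × Int × String) :=
  [("added", 0, "Added"), ("changed", 1, "Changed"), ("deprecated", 2, "Deprecated"),
   ("removed", 3, "Removed"), ("fixed", 4, "Fixed"), ("security", 5, "Security"),
   ("performance", 6, "Performance"), ("documentation", 7, "Documentation"),
   ("infrastructure", 8, "Infrastructure"), ("testing", 9, "Testing")]

-- the triple produced for the category t of pvLabelList (none if absent or empty)
def pvGate (d : PySem.Dict String (List String)) (t : String × Int × String) :
    Option (Int × String × List String) :=
  match d.get? t.1 with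
  | none => none
  | some es => if es.isEmpty then none else some (t.2.1, t.2.2, es)

-- A's lines for a section triple
def pvLinesOf (t : Int × String × List String) : List String :=
  ("### " ++ t.2.1) :: t.2.2.map (fun e => "- " ++ e)

-- B's characters for a section triple
def pvChunk (t : Int × String × List String) : List Char :=
  ['\n'] ++ ("### " ++ t.2.1 ++ "\n").toList
    ++ (t.2.2.map (fun e => ("- " ++ e ++ "\n").toList)).flatten

-- A's section lines, keyed by a (key, label) pair
def pvSec (d : PySem.Dict String (List String)) (kl : String × String) : Option (List String) :=
  match d.get? kl.1 with
  | none => none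
  | some es => if es.isEmpty then none else some (("### " ++ kl.2) :: es.map (fun e => "- " ++ e))

theorem pvFlattenSing (es : List String) :
    (es.map (fun e => ["- " ++ e])).flatten = es.map (fun e => "- " ++ e) := by
  induction es <;> simp [*]

theorem pvLemA (d : PySem.Dict String (List String)) (ks : List String) (acc : List String) :
    ks.foldl (pvStepA d) acc
      = acc ++ (ks.filterMap (fun k => pvSec d (k, pvCategoryNames.getD k ""))).flatMap (fun s => s ++ [""]) := by
  induction ks generalizing acc with
  | nil => simp
  | cons k ks ih =>
    simp only [List.foldl_cons, List.filterMap_cons]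
    rcases h : d.get? k with _ | es
    · simp [pvStepA, pvSec, h, ih]
    · by_cases he : es.isEmpty
      · simp [pvStepA, pvSec, h, he, ih]
      · simp [pvStepA, pvSec, h, he, ih, pvFlattenSing]

-- the (key, label) pairs A effectively walks = projections of pvLabelList
theorem pvOrderEq : pvCategoryOrder = pvLabelList.map (fun t => t.1) := by decide

theorem pvNamesEq : ∀ t ∈ pvLabelList, pvCategoryNames.getD t.1 "" = t.2.2 := by decide

-- A's filterMap over the category list = pvLinesOf of the gated triples
theorem pvSecGate (d : PySem.Dict String (List String)) (L : List (String × Int × String))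
    (h : ∀ t ∈ L, pvCategoryNames.getD t.1 "" = t.2.2) :
    (L.map (fun t => t.1)).filterMap (fun k => pvSec d (k, pvCategoryNames.getD k ""))
      = (L.filterMap (pvGate d)).map pvLinesOf := by
  induction L with
  | nil => simp
  | cons t L ih =>
    have ht : pvCategoryNames.getD t.1 "" = t.2.2 := h t (by simp)
    have ihh := ih (fun u hu => h u (by simp [hu]))
    have e1 : pvSec d (t.1, pvCategoryNames.getD t.1 "") = (pvGate d t).map pvLinesOf := by
      unfold pvSec pvGate
      rcases hd : d.get? t.1 with _ | es
      · rfl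
      · by_cases he : es.isEmpty
        · simp [he]
        · simp [he, pvLinesOf, ht]
    simp only [List.map_cons, List.filterMap_cons, e1]
    rcases pvGate d t with _ | tri
    · simpa using ihh
    · simp [ihh]

-- ---- sorting: B's sorted gated dict items = A's rank-ordered gated list ----

theorem pvLabelGet : ∀ t ∈ pvLabelList, pvLabels.get? t.1 = some t.2 := by decide

theorem pvLabelMem (k : String) (rl : Int × String) (h : pvLabels.get? k = some rl) :
    (k, rl.1, rl.2) ∈ pvLabelList := by
  have h' := PySem.Dict.mem_items_of_get?_eq_some pvLabels h
  have h2 : (k, rl) ∈ [("added", ((0 : Int), "Added")), ("changed", (1, "Changed")),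
      ("deprecated", (2, "Deprecated")), ("removed", (3, "Removed")), ("fixed", (4, "Fixed")),
      ("security", (5, "Security")), ("performance", (6, "Performance")),
      ("documentation", (7, "Documentation")), ("infrastructure", (8, "Infrastructure")),
      ("testing", (9, "Testing"))] := h'
  fin_cases h2 <;> decide

theorem pvRankKey : ∀ t ∈ pvLabelList, ∀ u ∈ pvLabelList, t.2.1 = u.2.1 → t.1 = u.1 := by decide

theorem pvRankLt : pvLabelList.Pairwise (fun a b => a.2.1 < b.2.1) := by decide

theorem pvPairwiseA (d : PySem.Dict String (List String)) :
    (pvLabelList.filterMap (pvGate d)).Pairwise (fun a b => a.1 < b.1) := by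
  rw [List.pairwise_filterMap]
  refine pvRankLt.imp_of_mem ?_
  intro a b ha hb hlt x hx y hy
  unfold pvGate at hx hy
  rcases hda : d.get? a.1 with _ | es <;> rw [hda] at hx
  · simp at hx
  rcases hdb : d.get? b.1 with _ | fs <;> rw [hdb] at hy
  · simp at hy
  by_cases hea : es.isEmpty
  · simp [hea] at hx
  by_cases heb : fs.isEmpty
  · simp [heb] at hy
  simp only [if_neg hea] at hx
  simp only [if_neg heb] at hy
  cases hx ; cases hy
  simpa using hlt

theorem pvNodupA (d : PySem.Dict String (List String)) :
    (pvLabelList.filterMap (pvGate d)).Nodup := by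
  exact (pvPairwiseA d).imp (fun {a b} h heq => by subst heq; exact absurd h (lt_irrefl _))

theorem pvTripleRank (ki : String × List String) (x : Int × String × List String)
    (h : pvTriple ki = some x) :
    ∃ rl, pvLabels.get? ki.1 = some rl ∧ x = (rl.1, rl.2, ki.2) ∧ ki.2.isEmpty = false := by
  unfold pvTriple at h
  rcases hg : pvLabels.get? ki.1 with _ | rl <;> rw [hg] at h
  · simp at h
  · by_cases he : ki.2.isEmpty
    · simp [he] at h
    · simp only [if_neg he] at h
      cases h
      exact ⟨rl, rfl, rfl, by simpa using he⟩

theorem pvNodupB (d : PySem.Dict String (List String)) (hk : d.keys.Nodup) :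
    (d.items.filterMap pvTriple).Nodup := by
  have hpw : d.items.Pairwise (fun a b => a.1 ≠ b.1) := by
    simp only [PySem.Dict.keys] at hk
    exact List.pairwise_map.mp hk
  rw [List.Nodup, List.pairwise_filterMap]
  refine hpw.imp_of_mem ?_
  intro a b ha hb hne x hx y hy heq
  obtain ⟨rla, hga, rfl, -⟩ := pvTripleRank a x hx
  obtain ⟨rlb, hgb, hyv, -⟩ := pvTripleRank b y hy
  apply hne
  apply pvRankKey _ (pvLabelMem a.1 rla hga) _ (pvLabelMem b.1 rlb hgb)
  have : (rla.1, rla.2, a.2) = (rlb.1, rlb.2, b.2) := heq.trans hyv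
  simpa using congrArg Prod.fst this

theorem pvMemIff (d : PySem.Dict String (List String)) (hk : d.keys.Nodup)
    (tri : Int × String × List String) :
    tri ∈ pvLabelList.filterMap (pvGate d) ↔ tri ∈ d.items.filterMap pvTriple := by
  simp only [List.mem_filterMap]
  constructor
  · rintro ⟨t, htL, hg⟩
    unfold pvGate at hg
    rcases hd : d.get? t.1 with _ | es <;> rw [hd] at hg
    · simp at hg
    by_cases he : es.isEmpty
    · simp [he] at hg
    simp only [if_neg he] at hg
    refine ⟨(t.1, es), (PySem.Dict.get?_eq_some_iff_mem_items d t.1 es hk).1 hd, ?_⟩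
    unfold pvTriple
    rw [pvLabelGet t htL]
    simpa [he] using hg
  · rintro ⟨ki, hki, ht⟩
    obtain ⟨rl, hg, rfl, he⟩ := pvTripleRank ki _ ht
    have hmem := pvLabelMem ki.1 rl hg
    refine ⟨(ki.1, rl.1, rl.2), hmem, ?_⟩
    unfold pvGate
    have hdk : d.get? ki.1 = some ki.2 :=
      (PySem.Dict.get?_eq_some_iff_mem_items d ki.1 ki.2 hk).2 (by simpa using hki)
    rw [hdk]
    simp [he]

theorem pvSortedEq (entries : List (String × List String)) :
    PySem.List.sorted ((PySem.Dict.ofList entries).items.filterMap pvTriple) (fun t => t.1)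
      = pvLabelList.filterMap (pvGate (PySem.Dict.ofList entries)) := by
  have hk := PySem.Dict.nodup_keys_ofList (κ := String) (ν := List String) entries
  apply PySem.List.sorted_eq_of_perm_of_pairwise_lt
  · exact (List.perm_ext_iff_of_nodup (pvNodupA _) (pvNodupB _ hk)).2 (pvMemIff _ hk)
  · exact pvPairwiseA _

-- ---- string assembly ----

theorem pvNlToList : ("\n" : String).toList = ['\n'] := by decide

theorem pvJoinNilEnd (xs : List (List Char)) :
    PySem.Chars.join ['\n'] (xs ++ [[]]) = (xs.map (fun x => x ++ ['\n'])).flatten := by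
  induction xs with
  | nil => simp [PySem.Chars.join_singleton]
  | cons x xs ih =>
    cases xs with
    | nil => simp [PySem.Chars.join_cons_cons, PySem.Chars.join_singleton]
    | cons y ys =>
      simp only [List.cons_append] at ih ⊢
      rw [PySem.Chars.join_cons_cons, ih]
      simp [List.append_assoc]

theorem pvFMM {α β γ : Type} (f : α → β) (g : β → List γ) (l : List α) :
    (l.map f).flatMap g = l.flatMap (fun a => g (f a)) := by
  induction l <;> simp [*]

theorem pvMFM {α β γ : Type} (g : α → List β) (f : β → γ) (l : List α) :
    (l.flatMap g).map f = l.flatMap (fun a => (g a).map f) := by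
  induction l <;> simp [*]

theorem pvShift (secsL : List (List String)) :
    [""] ++ secsL.flatMap (fun L => L ++ [""]) = secsL.flatMap (fun L => "" :: L) ++ [""] := by
  induction secsL with
  | nil => rfl
  | cons s rest ih =>
    simp only [List.flatMap_cons, List.append_assoc,
      List.cons_append] at ih ⊢
    rw [ih]
    simp

theorem pvInner (es : List String) (init : String) :
    (es.foldl (fun o e => o ++ ("- " ++ e ++ "\n")) init).toList
      = init.toList ++ (es.map (fun e => ("- " ++ e ++ "\n").toList)).flatten := by
  induction es generalizing init with
  | nil => simp
  | cons e es ih => simp [ih, String.toList_append]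

theorem pvOuter (secs : List (Int × String × List String)) (init : String) :
    (secs.foldl
        (fun out t =>
          t.2.2.foldl (fun out e => out ++ ("- " ++ e ++ "\n"))
            (out ++ ("\n### " ++ t.2.1 ++ "\n"))) init).toList
      = init.toList ++ (secs.map pvChunk).flatten := by
  induction secs generalizing init with
  | nil => simp
  | cons t secs ih =>
    rw [List.foldl_cons, ih, pvInner]
    have h1 : ("\n### " ++ t.2.1 ++ "\n").toList = ['\n'] ++ ("### " ++ t.2.1 ++ "\n").toList := by
      simp [String.toList_append,
        show ("\n### " : String).toList = '\n' :: "### ".toList from by decide]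
    simp [pvChunk, String.toList_append, h1, List.append_assoc]

theorem pvChunkEq (t : Int × String × List String) :
    ['\n'] ++ (((pvLinesOf t).map String.toList).map
        (fun x => x ++ ['\n'])).flatten = pvChunk t := by
  simp only [pvLinesOf, pvChunk, List.map_cons, List.map_map, List.flatten_cons]
  have : ∀ e : String, ("- " ++ e ++ "\n").toList = ("- " ++ e).toList ++ ['\n'] := by
    intro e; rw [String.toList_append, pvNlToList]
  have h2 : ("### " ++ t.2.1 ++ "\n").toList = ("### " ++ t.2.1).toList ++ ['\n'] := by
    rw [String.toList_append, pvNlToList]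
  simp [h2, this, Function.comp_def, List.append_assoc]

theorem pvFlatsEq (secs : List (Int × String × List String)) :
    ((secs.flatMap (fun t => ([] : List Char) :: (pvLinesOf t).map String.toList)).map
        (fun x => x ++ ['\n'])).flatten = (secs.map pvChunk).flatten := by
  induction secs with
  | nil => rfl
  | cons t secs ih =>
    simp only [List.flatMap_cons, List.map_append, List.flatten_append, ih,
      List.map_cons, List.flatten_cons, List.nil_append]
    rw [pvChunkEq]

-- ===== VERDICT (by name: the statement is the Claim_ definition above) =====
theorem format_changelog_entry_spec : Claim_equal_format_changelog_entry := by
  intro version date entries _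
  unfold Spec_format_changelog_entry format_changelog_entry format_changelog_entry_alt
  rw [pvLemA, pvSortedEq]
  rw [← String.toList_inj]
  rw [pvOuter]
  set d := PySem.Dict.ofList entries with hd
  set H := "## [" ++ version ++ "] - " ++ date with hH
  have hsecs : pvCategoryOrder.filterMap (fun k => pvSec d (k, pvCategoryNames.getD k ""))
      = (pvLabelList.filterMap (pvGate d)).map pvLinesOf := by
    rw [pvOrderEq]; exact pvSecGate d pvLabelList pvNamesEq
  rw [hsecs]
  set secs := pvLabelList.filterMap (pvGate d) with hsecs'
  have hlines : ([H, ""] : List String) ++ (secs.map pvLinesOf).flatMap (fun s => s ++ [""])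
      = ([H] ++ secs.flatMap (fun t => "" :: pvLinesOf t)) ++ [""] := by
    calc ([H, ""] : List String) ++ (secs.map pvLinesOf).flatMap (fun s => s ++ [""])
        = [H] ++ ([""] ++ (secs.map pvLinesOf).flatMap (fun s => s ++ [""])) := by simp
      _ = [H] ++ ((secs.map pvLinesOf).flatMap (fun L => "" :: L) ++ [""]) := by rw [pvShift]
      _ = [H] ++ (secs.flatMap (fun t => "" :: pvLinesOf t) ++ [""]) := by rw [pvFMM]
      _ = ([H] ++ secs.flatMap (fun t => "" :: pvLinesOf t)) ++ [""] := by
            rw [List.append_assoc]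
  rw [hlines]
  rw [PySem.Str.toList_join, pvNlToList]
  have hmap : (([H] ++ secs.flatMap (fun t => "" :: pvLinesOf t)) ++ [""]).map String.toList
      = ([H.toList] ++ secs.flatMap (fun t => ([] : List Char) :: (pvLinesOf t).map String.toList)) ++ [[]] := by
    simp [pvMFM, show ("" : String).toList = ([] : List Char) from by decide]
  rw [hmap, pvJoinNilEnd]
  simp only [List.map_append, List.map_cons, List.map_nil, List.flatten_append, List.flatten_cons]
  rw [pvFlatsEq]
  simp [String.toList_append, pvNlToList, List.append_assoc]
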